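-- pv_equiv track=rewrite | github.com/haiwen/seahub | seahub/role_permissions/settings.py | merge_roles
-- ===== SOURCE A (Python) =====
-- from copy import deepcopy
--
-- def merge_roles(default, custom):
--     """Merge custom dict into the copy of default dict, and return the copy."""
--     copy = deepcopy(default)
--     for key in custom:
--         if key in default:
--             copy[key].update(custom[key])
--         else:
--             default_copy = default['default'].copy()
--             default_copy.update(custom[key])
--             copy[key] = default_copy
--
--     return copy
-- ===== SOURCE B (Python) =====
-- def merge_roles(default, custom):
--     """Merge custom dict into the copy of default dict, and return the copy."""
--     # Staged passes over a flat event stream instead of copy-then-patch: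
--     # 1) fix the key order, 2) flatten both dicts into (role, perm, value)
--     # events (defaults first, overrides last), 3) replay the events
--     # last-write-wins into a pre-seeded result.
--     order = list(default) + [k for k in custom if k not in default]
--     events = []
--     for k in order:
--         src = default[k] if k in default else default['default']
--         for p, v in src.items():
--             events.append((k, p, v))
--         for p, v in custom.get(k, {}).items():
--             events.append((k, p, v))
--     result = {k: {} for k in order}
--     for k, p, v in events:
--         result[k][p] = v
--     return result
-- ===== Notes on version B (the rewrite author's own statement) =====
-- stated objective: alternative
-- what changed: Instead of deep-copying the default dict and patching it key by key from custom, B works in three staged passes over a different representation: it fixes the key order, flattens both dicts into a flat (role, perm, value) event stream (defaults first, overrides last), and replays the events last-write-wins into a pre-seeded result.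
import Mathlib
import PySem

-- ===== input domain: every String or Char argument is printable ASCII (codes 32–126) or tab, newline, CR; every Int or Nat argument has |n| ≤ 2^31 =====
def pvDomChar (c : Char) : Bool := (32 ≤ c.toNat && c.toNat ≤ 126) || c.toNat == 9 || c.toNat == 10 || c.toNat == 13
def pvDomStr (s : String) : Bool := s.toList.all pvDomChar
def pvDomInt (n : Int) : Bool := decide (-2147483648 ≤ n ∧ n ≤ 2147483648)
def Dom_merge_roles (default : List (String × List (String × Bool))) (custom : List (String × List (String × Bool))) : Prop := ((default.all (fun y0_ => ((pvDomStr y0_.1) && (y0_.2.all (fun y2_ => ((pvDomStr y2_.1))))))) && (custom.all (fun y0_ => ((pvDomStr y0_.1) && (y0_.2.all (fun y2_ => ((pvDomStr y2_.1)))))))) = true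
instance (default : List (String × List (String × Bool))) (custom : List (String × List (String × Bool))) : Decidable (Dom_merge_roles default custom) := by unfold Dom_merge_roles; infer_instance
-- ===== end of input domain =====

-- B merges by flattening both dicts to a flat (role, perm, value) event stream replayed
-- last-write-wins into a pre-seeded result, instead of deep-copying the default dict and patching
-- it; return values proved equal on Pre_ (outside Pre_ both Pythons raise the same KeyError).

-- shared input plumbing: a Python dict[str, dict[str, bool]] argument as a PySem.Dict
def pvToDict (xs : List (String × List (String × Bool))) : PySem.Dict String (PySem.Dict String Bool) :=
  PySem.Dict.ofList (xs.map (fun p => (p.1, PySem.Dict.ofList p.2)))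

-- ===== PORT A =====
-- literal port: copy = deepcopy(default); for key in custom: copy[key].update(custom[key]) if key in
-- default else copy[key] = default['default'].copy() updated; default['default'] is ported with getD
-- whose `empty` default is only reachable where Python raises KeyError (excluded by Pre_).
def merge_roles (default : List (String × List (String × Bool))) (custom : List (String × List (String × Bool))) : List (String × List (String × Bool)) :=
  let d := pvToDict default
  let c := pvToDict custom
  let copy := c.keys.foldl (fun cp key =>
    if d.contains key then
      cp.modify key PySem.Dict.empty (fun v => v.update (c.getD key PySem.Dict.empty).items)
    else
      cp.insert key ((d.getD "default" PySem.Dict.empty).update (c.getD key PySem.Dict.empty).items)) d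
  copy.items.map (fun p => (p.1, p.2.items))

-- ===== PORT B =====
-- literal port of Source B, stage by stage: order = list(default) + new custom keys; events = the two
-- nested append loops flattening to (role, perm, value) triples ('default[k] if k in default else
-- default["default"]' is ported with getD whose `empty` default is only reachable where Python
-- raises KeyError, excluded by Pre_; custom.get(k, {}) is getD); result = {k: {} for k in order};
-- replay 'result[k][p] = v' — every event key k is in `order`, hence already in `result`, so
-- Python's 'result[k]' lookup never raises and `modify` is exact here.
def pvAltCore (d c : PySem.Dict String (PySem.Dict String Bool)) : List (String × List (String × Bool)) :=
  let order := d.keys ++ c.keys.filter (fun k => !(d.contains k))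
  let events := order.foldl (fun ev k =>
    let src := if d.contains k then d.getD k PySem.Dict.empty else d.getD "default" PySem.Dict.empty
    let ev1 := src.items.foldl (fun ev pv => ev ++ [(k, pv.1, pv.2)]) ev
    (c.getD k PySem.Dict.empty).items.foldl (fun ev pv => ev ++ [(k, pv.1, pv.2)]) ev1) []
  let result0 := order.foldl (fun r k => r.insert k PySem.Dict.empty) PySem.Dict.empty
  let result := events.foldl (fun r t => r.modify t.1 PySem.Dict.empty (fun m => m.insert t.2.1 t.2.2)) result0
  result.items.map (fun p => (p.1, p.2.items))

def merge_roles_alt (default : List (String × List (String × Bool))) (custom : List (String × List (String × Bool))) : List (String × List (String × Bool)) :=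
  pvAltCore (pvToDict default) (pvToDict custom)

-- ===== PRECONDITION & SPEC =====
-- Pre_ excludes exactly the inputs where Python A raises KeyError: some custom key is absent from
-- default while default has no 'default' entry (B raises the same KeyError there).
def Pre_merge_roles (default : List (String × List (String × Bool))) (custom : List (String × List (String × Bool))) : Prop :=
  (∀ p ∈ custom, p.1 ∈ default.map Prod.fst) ∨ "default" ∈ default.map Prod.fst
instance (default : List (String × List (String × Bool))) (custom : List (String × List (String × Bool))) : Decidable (Pre_merge_roles default custom) := by unfold Pre_merge_roles; infer_instance

def pvWitness_merge_roles : (List (String × List (String × Bool))) × (List (String × List (String × Bool))) :=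
  ([("default", [("can_x", true)]), ("a", [("can_y", false)])], [("a", [("can_x", false)]), ("b", [("can_y", true)])])

def Spec_merge_roles (default : List (String × List (String × Bool))) (custom : List (String × List (String × Bool))) (out : List (String × List (String × Bool))) : Prop := out = merge_roles_alt default custom
instance (default : List (String × List (String × Bool))) (custom : List (String × List (String × Bool))) (out : List (String × List (String × Bool))) : Decidable (Spec_merge_roles default custom out) := by unfold Spec_merge_roles; infer_instance

-- ===== CLAIM (what is proved, stated in full; the proofs are below) =====
def Claim_equal_merge_roles : Prop := ∀ (default : List (String × List (String × Bool))) (custom : List (String × List (String × Bool))), Dom_merge_roles default custom → Pre_merge_roles default custom → Spec_merge_roles default custom (merge_roles default custom)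

-- ===== LEMMAS AND PROOFS =====

-- the common normal form both programs are reduced to: patched default entries, then the fresh
-- custom-only entries seeded from default['default'] (update [] = identity covers c-absent keys)
def pvMerged (d c : PySem.Dict String (PySem.Dict String Bool)) : List (String × PySem.Dict String Bool) :=
  d.items.map (fun p => (p.1, p.2.update (c.getD p.1 PySem.Dict.empty).items))
  ++ (c.items.filter (fun p => !(d.contains p.1))).map
      (fun p => (p.1, (d.getD "default" PySem.Dict.empty).update p.2.items))

-- ---------- A side ----------

-- A's loop body, with the looked-up value supplied as p.2 and the new-key seed as `base`
def pvStep (d : PySem.Dict String (PySem.Dict String Bool)) (base : PySem.Dict String Bool)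
    (cp : PySem.Dict String (PySem.Dict String Bool)) (p : String × PySem.Dict String Bool) :
    PySem.Dict String (PySem.Dict String Bool) :=
  if d.contains p.1 then cp.insert p.1 ((cp.getD p.1 PySem.Dict.empty).update p.2.items)
  else cp.insert p.1 (base.update p.2.items)

-- shape of A's whole loop: existing keys get patched in place, fresh keys are appended in order
theorem pvFold_items (d : PySem.Dict String (PySem.Dict String Bool)) (base : PySem.Dict String Bool)
    (ps : List (String × PySem.Dict String Bool)) :
    ∀ (cp : PySem.Dict String (PySem.Dict String Bool)),
    cp.keys.Nodup → (ps.map Prod.fst).Nodup →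
    (∀ k, d.contains k = true → cp.contains k = true) →
    (∀ p ∈ ps, d.contains p.1 = false → cp.contains p.1 = false) →
    (ps.foldl (pvStep d base) cp).items =
      cp.items.map (fun q => match ps.find? (fun p => p.1 == q.1) with
                             | some p => (q.1, q.2.update p.2.items)
                             | none => q)
      ++ (ps.filter (fun p => !(d.contains p.1))).map (fun p => (p.1, base.update p.2.items)) := by
  induction ps with
  | nil => intro cp _ _ _ _; simp
  | cons p0 rest ih =>
    intro cp h1 h2 h3 h4
    rw [List.map_cons, List.nodup_cons] at h2
    obtain ⟨hnotin, h2'⟩ := h2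
    have hrestfalse : ∀ p ∈ rest, (p.1 == p0.1) = false := by
      intro p hp
      by_cases he : p.1 = p0.1
      · exact absurd (he ▸ List.mem_map_of_mem hp) hnotin
      · simpa using he
    have hfindrest : rest.find? (fun p => p.1 == p0.1) = none :=
      List.find?_eq_none.mpr (fun x hx => by simp [hrestfalse x hx])
    by_cases hd : d.contains p0.1 = true
    · -- existing key: in-place patch
      have hc : cp.contains p0.1 = true := h3 _ hd
      have hstep : pvStep d base cp p0
          = cp.insert p0.1 ((cp.getD p0.1 PySem.Dict.empty).update p0.2.items) := by
        simp [pvStep, hd]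
      have hitems := PySem.Dict.items_insert_of_contains cp
        ((cp.getD p0.1 PySem.Dict.empty).update p0.2.items) hc
      rw [List.foldl_cons, hstep,
          ih _ (PySem.Dict.nodup_keys_insert _ _ _ h1) h2'
            (fun k hk => by rw [PySem.Dict.contains_insert]; simp [h3 k hk])
            (fun p hp hdp => by
              rw [PySem.Dict.contains_insert]
              simp [hrestfalse p hp, h4 p (List.mem_cons_of_mem _ hp) hdp]),
          hitems, List.map_map]
      have hfilter : ((p0 :: rest).filter (fun p => !(d.contains p.1)))
          = rest.filter (fun p => !(d.contains p.1)) := by simp [hd]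
      rw [hfilter]
      congr 1
      apply List.map_congr_left
      intro q hq
      by_cases hq1 : q.1 = p0.1
      · have hmem : (p0.1, q.2) ∈ cp.items := by
          have : q = (p0.1, q.2) := by rw [← hq1]
          rwa [this] at hq
        have hgetD : cp.getD p0.1 PySem.Dict.empty = q.2 :=
          PySem.Dict.getD_of_mem_items cp hmem h1 _
        simp [Function.comp, hq1, hfindrest, List.find?_cons_of_pos, hgetD]
      · have hne : (q.1 == p0.1) = false := by simpa using hq1
        have hne' : (p0.1 == q.1) = false := by simpa using (Ne.symm hq1)
        simp [Function.comp, hne, List.find?_cons_of_neg, hne']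
    · -- fresh key: appended
      rw [Bool.not_eq_true] at hd
      have hcf : cp.contains p0.1 = false := h4 p0 List.mem_cons_self hd
      have hallne : ∀ q ∈ cp.items, (q.1 == p0.1) = false := by
        intro q hq
        by_cases he : q.1 = p0.1
        · exfalso
          have : cp.contains p0.1 = true := by
            unfold PySem.Dict.contains
            rw [List.any_eq_true]
            exact ⟨q, hq, by simpa using he⟩
          simp [this] at hcf
        · simpa using he
      have hstep : pvStep d base cp p0 = cp.insert p0.1 (base.update p0.2.items) := by
        simp [pvStep, hd]
      have hitems := PySem.Dict.items_insert_of_not_contains cp (base.update p0.2.items) hcf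
      rw [List.foldl_cons, hstep,
          ih _ (PySem.Dict.nodup_keys_insert _ _ _ h1) h2'
            (fun k hk => by rw [PySem.Dict.contains_insert]; simp [h3 k hk])
            (fun p hp hdp => by
              rw [PySem.Dict.contains_insert]
              simp [hrestfalse p hp, h4 p (List.mem_cons_of_mem _ hp) hdp]),
          hitems]
      have hfilter : ((p0 :: rest).filter (fun p => !(d.contains p.1)))
          = p0 :: rest.filter (fun p => !(d.contains p.1)) := by simp [hd]
      rw [hfilter, List.map_append, List.map_cons]
      have hmapeq : cp.items.map (fun q => match rest.find? (fun p => p.1 == q.1) with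
                             | some p => (q.1, q.2.update p.2.items)
                             | none => q)
          = cp.items.map (fun q => match (p0 :: rest).find? (fun p => p.1 == q.1) with
                             | some p => (q.1, q.2.update p.2.items)
                             | none => q) := by
        apply List.map_congr_left
        intro q hq
        have : (p0.1 == q.1) = false := by
          have := hallne q hq
          by_cases he : p0.1 = q.1
          · simp [he.symm] at this
          · simpa using he
        rw [List.find?_cons_of_neg (by simp [this])]
      rw [hmapeq]
      simp [hfindrest]

-- A's loop result, in the common normal form
theorem pvMainA (d c : PySem.Dict String (PySem.Dict String Bool))
    (hdn : d.keys.Nodup) (hcn : c.keys.Nodup) :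
    (c.keys.foldl (fun cp key =>
      if d.contains key then
        cp.modify key PySem.Dict.empty (fun v => v.update (c.getD key PySem.Dict.empty).items)
      else
        cp.insert key ((d.getD "default" PySem.Dict.empty).update (c.getD key PySem.Dict.empty).items)) d).items
    = pvMerged d c := by
  have hmapnodup : (c.items.map Prod.fst).Nodup := hcn
  have hstep : c.keys.foldl (fun cp key =>
      if d.contains key then
        cp.modify key PySem.Dict.empty (fun v => v.update (c.getD key PySem.Dict.empty).items)
      else
        cp.insert key ((d.getD "default" PySem.Dict.empty).update (c.getD key PySem.Dict.empty).items)) d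
      = c.items.foldl (pvStep d (d.getD "default" PySem.Dict.empty)) d := by
    show (c.items.map (fun x => x.1)).foldl _ d = _
    rw [List.foldl_map]
    apply PySem.List.foldl_congr_mem
    intro acc p hp
    have hget : c.getD p.1 PySem.Dict.empty = p.2 :=
      PySem.Dict.getD_of_mem_items c (by simpa using hp) hcn _
    by_cases hd : d.contains p.1 = true <;>
      simp [pvStep, PySem.Dict.modify, hget, hd]
  rw [hstep,
      pvFold_items d (d.getD "default" PySem.Dict.empty) c.items d hdn hmapnodup
        (fun k hk => hk) (fun p _ hdp => hdp)]
  unfold pvMerged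
  congr 1
  apply List.map_congr_left
  intro q _
  have hgd : c.getD q.1 PySem.Dict.empty = ((c.get? q.1).getD PySem.Dict.empty) :=
    PySem.Dict.getD_eq_get?_getD c q.1 _
  cases hf : c.items.find? (fun p => p.1 == q.1) with
  | none =>
    have hnone : c.get? q.1 = none := by simp [PySem.Dict.get?, hf]
    simp only [hgd, hnone, Option.getD_none]
    rfl
  | some p =>
    have hsome : c.get? q.1 = some p.2 := by simp [PySem.Dict.get?, hf]
    simp [hgd, hsome]

-- ---------- B side ----------

-- fold of plain inserts rebuilds a nodup-keyed dict from its items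
theorem pvRebuild (m : PySem.Dict String Bool) (h : m.keys.Nodup) :
    m.items.foldl (fun acc p => acc.insert p.1 p.2) PySem.Dict.empty = m := by
  apply PySem.Dict.ext
  have := PySem.Dict.items_foldl_insert_fresh m.items Prod.fst Prod.snd PySem.Dict.empty
    (fun a _ => PySem.Dict.contains_empty _) h
  simpa using this

-- replay of the event stream, observed at one key: only that key's events matter
theorem pvReplay_getD (ev : List (String × String × Bool)) :
    ∀ (r : PySem.Dict String (PySem.Dict String Bool)) (k : String),
    (ev.foldl (fun r t => r.modify t.1 PySem.Dict.empty (fun m => m.insert t.2.1 t.2.2)) r).getD k PySem.Dict.empty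
    = (ev.filter (fun t => t.1 == k)).foldl (fun m t => m.insert t.2.1 t.2.2) (r.getD k PySem.Dict.empty) := by
  induction ev with
  | nil => intro r k; simp
  | cons t rest ih =>
    intro r k
    rw [List.foldl_cons, ih]
    by_cases he : t.1 = k
    · subst he
      rw [List.filter_cons_of_pos (by simp), List.foldl_cons, PySem.Dict.getD_modify_self]
    · rw [List.filter_cons_of_neg (by simpa using he), PySem.Dict.getD_modify]
      rw [if_neg (Ne.symm he)]

-- updating a set with elements it already has is the identity
theorem pvSetUpdate_id (l : List String) :
    ∀ (s : PySem.Set String), (∀ x ∈ l, x ∈ s) → PySem.Set.update s l = s := by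
  induction l with
  | nil => intro s _; rfl
  | cons x rest ih =>
    intro s h
    show PySem.Set.update (PySem.Set.add s x) rest = s
    have hadd : PySem.Set.add s x = s := by
      have hc : PySem.Set.contains s x = true := by
        simp [PySem.Set.contains]; exact h x List.mem_cons_self
      show (if PySem.Set.contains s x then s else s ++ [x]) = s
      rw [hc]; simp
    rw [hadd]
    exact ih s (fun y hy => h y (List.mem_cons_of_mem _ hy))

-- pre-seeding {k: {} for k in order} gives the empty dict at every key
theorem pvSeed_getD (l : List String) :
    ∀ (r : PySem.Dict String (PySem.Dict String Bool)) (k : String),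
    r.getD k PySem.Dict.empty = PySem.Dict.empty →
    (l.foldl (fun r k => r.insert k PySem.Dict.empty) r).getD k PySem.Dict.empty = PySem.Dict.empty := by
  induction l with
  | nil => intro r k h; simpa using h
  | cons x rest ih =>
    intro r k h
    rw [List.foldl_cons]
    apply ih
    by_cases he : k = x
    · subst he; rw [PySem.Dict.getD_insert_self]
    · rw [PySem.Dict.getD_insert, if_neg he]; exact h

-- the flattened events filtered to one key of `order` are exactly that key's own block
theorem pvFlat_filter (g : String → List (String × String × Bool))
    (hg : ∀ k t, t ∈ g k → t.1 = k) (l : List String) (k : String)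
    (hn : l.Nodup) (hm : k ∈ l) :
    (l.flatMap g).filter (fun t => t.1 == k) = g k := by
  rw [List.filter_flatMap]
  induction l with
  | nil => cases hm
  | cons x rest ih =>
    rw [List.nodup_cons] at hn
    rw [List.flatMap_cons]
    by_cases he : x = k
    · subst he
      have h1 : (g x).filter (fun t => t.1 == x) = g x :=
        List.filter_eq_self.mpr (fun t ht => by simp [hg x t ht])
      have h2 : rest.flatMap (fun k' => (g k').filter (fun t => t.1 == x)) = [] := by
        apply List.flatMap_eq_nil_iff.mpr
        intro k' hk'
        apply List.filter_eq_nil_iff.mpr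
        intro t ht
        have ht1 := hg k' t ht
        have hne : k' ≠ x := fun hh => hn.1 (hh ▸ hk')
        simp [ht1, hne]
      rw [h1, h2, List.append_nil]
    · have hm' : k ∈ rest := by
        cases hm with
        | head => exact absurd rfl he
        | tail _ h => exact h
      have h1 : (g x).filter (fun t => t.1 == k) = [] := by
        apply List.filter_eq_nil_iff.mpr
        intro t ht
        simp [hg x t ht, he]
      rw [h1, List.nil_append]
      exact ih hn.2 hm'

-- B's core, in the common normal form
theorem pvMainB (d c : PySem.Dict String (PySem.Dict String Bool))
    (hdn : d.keys.Nodup) (hcn : c.keys.Nodup)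
    (hvals : ∀ p ∈ d.items, p.2.keys.Nodup) :
    pvAltCore d c = (pvMerged d c).map (fun p => (p.1, p.2.items)) := by
  unfold pvAltCore
  show (((d.keys ++ c.keys.filter (fun k => !(d.contains k))).foldl (fun ev k =>
      (c.getD k PySem.Dict.empty).items.foldl (fun ev pv => ev ++ [(k, pv.1, pv.2)])
        ((if d.contains k then d.getD k PySem.Dict.empty else d.getD "default" PySem.Dict.empty).items.foldl
          (fun ev pv => ev ++ [(k, pv.1, pv.2)]) ev)) []).foldl
      (fun r t => r.modify t.1 PySem.Dict.empty (fun m => m.insert t.2.1 t.2.2))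
      ((d.keys ++ c.keys.filter (fun k => !(d.contains k))).foldl
        (fun r k => r.insert k PySem.Dict.empty) PySem.Dict.empty)).items.map (fun p => (p.1, p.2.items))
    = (pvMerged d c).map (fun p => (p.1, p.2.items))
  set base := d.getD "default" PySem.Dict.empty with hbase
  set order := d.keys ++ c.keys.filter (fun k => !(d.contains k)) with horder
  set g : String → List (String × String × Bool) := fun k =>
    (if d.contains k then d.getD k PySem.Dict.empty else base).items.map (fun pv => (k, pv.1, pv.2))
    ++ (c.getD k PySem.Dict.empty).items.map (fun pv => (k, pv.1, pv.2)) with hgdef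
  -- order is duplicate-free
  have hofilt : (c.keys.filter (fun k => !(d.contains k))).Nodup := hcn.filter _
  have hdisj : ∀ x ∈ d.keys, x ∉ c.keys.filter (fun k => !(d.contains k)) := by
    intro x hx hmem
    have := List.of_mem_filter hmem
    rw [(PySem.Dict.contains_iff_mem_keys d x).mpr hx] at this
    simp at this
  have hon : order.Nodup := by
    rw [horder]
    exact List.Nodup.append hdn hofilt (fun x hx hy => hdisj x hx hy)
  -- (1) the event stream is order.flatMap g
  have hev : order.foldl (fun ev k =>
      (c.getD k PySem.Dict.empty).items.foldl (fun ev pv => ev ++ [(k, pv.1, pv.2)])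
        ((if d.contains k then d.getD k PySem.Dict.empty else d.getD "default" PySem.Dict.empty).items.foldl
          (fun ev pv => ev ++ [(k, pv.1, pv.2)]) ev)) []
      = order.flatMap g := by
    have hfun : (fun (ev : List (String × String × Bool)) (k : String) =>
        (c.getD k PySem.Dict.empty).items.foldl (fun ev pv => ev ++ [(k, pv.1, pv.2)])
          ((if d.contains k then d.getD k PySem.Dict.empty else d.getD "default" PySem.Dict.empty).items.foldl
            (fun ev pv => ev ++ [(k, pv.1, pv.2)]) ev))
        = fun ev k => ev ++ g k := by
      funext ev k
      rw [PySem.List.foldl_append_singleton_eq_map, PySem.List.foldl_append_singleton_eq_map,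
          hgdef, ← hbase, List.append_assoc]
    rw [hfun, PySem.List.foldl_append_eq_flatMap, List.nil_append]
  rw [hev]
  set events := order.flatMap g with hevents
  -- every event carries its block's key
  have hgkey : ∀ k t, t ∈ g k → t.1 = k := by
    intro k t ht
    rw [hgdef] at ht
    rcases List.mem_append.mp ht with h | h <;>
      · obtain ⟨pv, _, hpv⟩ := List.mem_map.mp h
        rw [← hpv]
  have hevkey : ∀ t ∈ events, t.1 ∈ order := by
    intro t ht
    obtain ⟨k, hk, htk⟩ := List.mem_flatMap.mp ht
    rw [hgkey k t htk]; exact hk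
  -- (2) the seed's keys are order, so the replayed result's keys are order too
  set result0 := order.foldl (fun r k => r.insert k PySem.Dict.empty) PySem.Dict.empty with hres0
  have hkeys0 : result0.keys = order := by
    rw [hres0, PySem.Dict.keys_foldl_insert order (fun _ _ => PySem.Dict.empty) PySem.Dict.empty]
    have : (PySem.Dict.empty : PySem.Dict String (PySem.Dict String Bool)).keys = ([] : List String) :=
      PySem.Dict.keys_empty
    rw [this]
    show PySem.Set.ofList order = order
    exact PySem.Set.ofList_eq_self_of_nodup order hon
  set result := events.foldl (fun r t => r.modify t.1 PySem.Dict.empty (fun m => m.insert t.2.1 t.2.2)) result0 with hres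
  have hkeys : result.keys = order := by
    rw [hres, PySem.Dict.keys_foldl_modify_key events (fun t => t.1) PySem.Dict.empty
          (fun _ t m => m.insert t.2.1 t.2.2) result0, hkeys0]
    exact pvSetUpdate_id _ order (fun x hx => by
      obtain ⟨t, ht, hxt⟩ := List.mem_map.mp hx
      exact hxt ▸ hevkey t ht)
  -- (3) the result's items, key by key
  have hitems : result.items = order.map (fun k => (k, result.getD k PySem.Dict.empty)) := by
    rw [PySem.Dict.items_eq_map_keys result (hkeys ▸ hon) PySem.Dict.empty, hkeys]
  have hval : ∀ k ∈ order,
      result.getD k PySem.Dict.empty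
      = (if d.contains k then d.getD k PySem.Dict.empty else base).update (c.getD k PySem.Dict.empty).items := by
    intro k hk
    have hsrcn : (if d.contains k then d.getD k PySem.Dict.empty else base).keys.Nodup := by
      by_cases hc' : d.contains k = true
      · have hkd : k ∈ d.keys := (PySem.Dict.contains_iff_mem_keys d k).mp hc'
        have hmem : (k, d.getD k PySem.Dict.empty) ∈ d.items := by
          rw [PySem.Dict.items_eq_map_keys d hdn PySem.Dict.empty]
          exact List.mem_map_of_mem hkd
        simpa [hc'] using hvals _ hmem
      · rw [if_neg hc', hbase]
        by_cases hdef : d.contains "default" = true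
        · have hkd : "default" ∈ d.keys := (PySem.Dict.contains_iff_mem_keys d _).mp hdef
          have hmem : ("default", d.getD "default" PySem.Dict.empty) ∈ d.items := by
            rw [PySem.Dict.items_eq_map_keys d hdn PySem.Dict.empty]
            exact List.mem_map_of_mem hkd
          exact hvals _ hmem
        · rw [PySem.Dict.getD_of_not_contains d _ (by simpa using hdef)]
          exact PySem.Dict.nodup_keys_empty
    rw [hres, pvReplay_getD, pvSeed_getD order PySem.Dict.empty k (PySem.Dict.getD_empty _ _),
        hevents, pvFlat_filter g hgkey order k hon hk, hgdef]
    rw [List.foldl_append, List.foldl_map, List.foldl_map]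
    show (c.getD k PySem.Dict.empty).items.foldl (fun m pv => m.insert pv.1 pv.2)
        ((if d.contains k then d.getD k PySem.Dict.empty else base).items.foldl
          (fun m pv => m.insert pv.1 pv.2) PySem.Dict.empty)
      = _
    rw [pvRebuild _ hsrcn]
    rfl
  -- (4) identify the two halves with pvMerged
  have hlist : order.map (fun k => (k, result.getD k PySem.Dict.empty)) = pvMerged d c := by
    rw [List.map_congr_left (fun k hk => by rw [hval k hk]), horder]
    unfold pvMerged
    rw [List.map_append]
    congr 1
    · -- the default-keys half
      rw [PySem.Dict.items_eq_map_keys d hdn PySem.Dict.empty, List.map_map]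
      apply List.map_congr_left
      intro k hk
      have hc' : d.contains k = true := (PySem.Dict.contains_iff_mem_keys d k).mpr hk
      simp only [Function.comp, hc', if_pos]
    · -- the fresh custom-keys half
      have hckeys : c.keys.filter (fun k => !(d.contains k))
          = (c.items.filter (fun p => !(d.contains p.1))).map Prod.fst := by
        show (c.items.map Prod.fst).filter (fun k => !(d.contains k)) = _
        rw [List.filter_map]; rfl
      rw [hckeys, List.map_map]
      apply List.map_congr_left
      intro p hp
      have hpm : p ∈ c.items := List.mem_of_mem_filter hp
      have hpc : d.contains p.1 = false := by simpa using List.of_mem_filter hp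
      have hgp : c.getD p.1 PySem.Dict.empty = p.2 :=
        PySem.Dict.getD_of_mem_items c hpm hcn _
      simp only [Function.comp, hpc, if_neg, Bool.false_eq_true, not_false_iff, hgp]
      rw [hbase]
  rw [hitems, hlist]

-- values of pvToDict have duplicate-free keys (each is a Dict.ofList)
theorem pvValsOfFold (L : List (String × PySem.Dict String Bool)) :
    ∀ (d : PySem.Dict String (PySem.Dict String Bool)),
    (∀ v ∈ d.values, v.keys.Nodup) → (∀ p ∈ L, p.2.keys.Nodup) →
    ∀ q ∈ (L.foldl (fun d p => d.insert p.1 p.2) d).items, q.2.keys.Nodup := by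
  induction L with
  | nil => intro d hd _ q hq; exact hd q.2 (List.mem_map_of_mem hq)
  | cons p rest ih =>
    intro d hd hL q hq
    refine ih _ ?_ (fun r hr => hL r (List.mem_cons_of_mem _ hr)) q hq
    intro v hv
    rcases PySem.Dict.mem_values_insert d _ _ _ hv with h | h
    · exact h ▸ hL p List.mem_cons_self
    · exact hd v h

theorem pvToDict_vals (xs : List (String × List (String × Bool))) :
    ∀ p ∈ (pvToDict xs).items, p.2.keys.Nodup := by
  intro p hp
  have hrw : pvToDict xs = (xs.map (fun p => (p.1, PySem.Dict.ofList p.2))).foldl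
      (fun d p => d.insert p.1 p.2) PySem.Dict.empty := rfl
  rw [hrw] at hp
  refine pvValsOfFold (xs.map (fun p => (p.1, PySem.Dict.ofList p.2))) PySem.Dict.empty
    (fun v hv => by simp [PySem.Dict.values_mk, PySem.Dict.empty] at hv) ?_ p hp
  intro r hr
  obtain ⟨q, _, hq⟩ := List.mem_map.mp hr
  rw [← hq]
  exact PySem.Dict.nodup_keys_ofList q.2

-- ===== VERDICT (by name: the statement is the Claim_ definition above) =====
theorem merge_roles_spec : Claim_equal_merge_roles := by
  intro default custom _ _
  show merge_roles default custom = merge_roles_alt default custom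
  unfold merge_roles merge_roles_alt
  rw [pvMainB (pvToDict default) (pvToDict custom)
        (PySem.Dict.nodup_keys_ofList _) (PySem.Dict.nodup_keys_ofList _)
        (pvToDict_vals default)]
  show (((pvToDict custom).keys.foldl (fun cp key =>
      if (pvToDict default).contains key then
        cp.modify key PySem.Dict.empty (fun v => v.update ((pvToDict custom).getD key PySem.Dict.empty).items)
      else
        cp.insert key (((pvToDict default).getD "default" PySem.Dict.empty).update
          ((pvToDict custom).getD key PySem.Dict.empty).items)) (pvToDict default)).items).map
      (fun p => (p.1, p.2.items))
    = (pvMerged (pvToDict default) (pvToDict custom)).map (fun p => (p.1, p.2.items))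
  rw [pvMainA (pvToDict default) (pvToDict custom)
        (PySem.Dict.nodup_keys_ofList _) (PySem.Dict.nodup_keys_ofList _)]
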